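-- pv_equiv track=rewrite | github.com/nimunsang/CODINGTEST | ELSE/practPROB.py | solution
-- ===== SOURCE A (Python) =====
-- def solution(n):
--     start = 0
--     i = 1
--     minimum = 0
--     maximum = 0
--     answer = []
--     while True:
--         if start < n <= start + 3**i:
--             minimum = start+1
--             maximum = start + 3**i
--             break
--         start = start + 3**i
--         i += 1
--
--
--     def find(a, b, n):
--         if b-a <= 1:
--             return
--
--         if a <= n < a+(b-a+1)//3:
--             answer.append(1)
--             find(a, a+(b-a+1)//3, n)
--
--         elif a+(b-a+1)//3 <= n < a+(b-a+1)*2//3: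
--             answer.append(2)
--             find(a+(b-a+1)//3, a+(b-a+1)*2//3, n)
--
--         elif a+(b-a+1)*2//3 <= n <= b:
--             answer.append(4)
--             find(a+(b-a+1)*2//3, b, n)
--
--
--     find(minimum, maximum, n)
--     return ''.join(map(str, answer))
-- ===== SOURCE B (Python) =====
-- def solution(n):
--     s = ""
--     while n != 0:
--         s = "412"[n % 3] + s
--         n = (n - 1) // 3
--     return s
-- ===== Notes on version B (the rewrite author's own statement) =====
-- stated objective: simpler
-- what changed: A finds the 3^i-sized value range with a while-loop and then recursively subdivides it into thirds, appending the digit of each third; B is the standard iterative bijective base-3 conversion that repeatedly prepends "412"[n % 3] and sets n = (n - 1) // 3.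
import Mathlib
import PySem

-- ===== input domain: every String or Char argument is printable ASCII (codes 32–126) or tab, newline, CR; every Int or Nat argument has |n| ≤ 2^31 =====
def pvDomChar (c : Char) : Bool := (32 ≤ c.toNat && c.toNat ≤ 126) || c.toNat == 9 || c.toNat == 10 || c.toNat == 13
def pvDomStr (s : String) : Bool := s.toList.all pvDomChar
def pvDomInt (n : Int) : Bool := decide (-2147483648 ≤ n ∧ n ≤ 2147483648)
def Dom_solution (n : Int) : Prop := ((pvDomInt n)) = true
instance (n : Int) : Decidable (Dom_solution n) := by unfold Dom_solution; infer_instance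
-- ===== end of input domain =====

-- B replaces A's range-finding while-loop plus recursive ternary subdivision by the standard
-- iterative least-significant-digit-first bijective base-3 conversion (objective: simpler).

-- ===== PORT A =====
-- A's outer `while True` loop; the fuel bounds its iterations (A diverges for n ≤ 0, excluded by Pre_)
def pvLoopA : Nat → Int → Nat → Int → Int × Int
  | 0, start, i, _ => (start + 1, start + 3 ^ i)
  | fuel+1, start, i, n =>
    if start < n ∧ n ≤ start + 3 ^ i then (start + 1, start + 3 ^ i)
    else pvLoopA fuel (start + 3 ^ i) (i + 1) n

-- A's recursive `find`, returning the `answer` list it appends to; the fuel bounds the depth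
def pvFindA : Nat → Int → Int → Int → List Int
  | 0, _, _, _ => []
  | fuel+1, a, b, n =>
    if b - a ≤ 1 then []
    else
      if a ≤ n ∧ n < a + PySem.Int.floordiv (b - a + 1) 3 then
        1 :: pvFindA fuel a (a + PySem.Int.floordiv (b - a + 1) 3) n
      else if a + PySem.Int.floordiv (b - a + 1) 3 ≤ n ∧ n < a + PySem.Int.floordiv ((b - a + 1) * 2) 3 then
        2 :: pvFindA fuel (a + PySem.Int.floordiv (b - a + 1) 3) (a + PySem.Int.floordiv ((b - a + 1) * 2) 3) n
      else if a + PySem.Int.floordiv ((b - a + 1) * 2) 3 ≤ n ∧ n ≤ b then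
        4 :: pvFindA fuel (a + PySem.Int.floordiv ((b - a + 1) * 2) 3) b n
      else []

def solution (n : Int) : String :=
  let mm := pvLoopA (n.toNat + 1) 0 1 n
  PySem.Str.join "" ((pvFindA ((mm.2 - mm.1).toNat + 1) mm.1 mm.2 n).map PySem.Int.toStr)

-- ===== PORT B =====
-- B's `while n != 0` loop; the fuel bounds its iterations (B diverges for n < 0, excluded by Pre_)
def pvLoopB : Nat → Int → String → String
  | 0, _, s => s
  | fuel+1, n, s =>
    if n ≠ 0 then
      match PySem.Str.pyGet? "412" (PySem.Int.mod n 3) with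
      | some c => pvLoopB fuel (PySem.Int.floordiv (n - 1) 3) (String.ofList [c] ++ s)
      | none => s    -- unreachable: 0 ≤ n % 3 < 3
    else s

def solution_alt (n : Int) : String := pvLoopB (n.toNat + 1) n ""

-- ===== PRECONDITION & SPEC =====
-- Pre_ excludes n ≤ 0, on which A's outer `while True` loop never breaks (A diverges, returning nothing).
def Pre_solution (n : Int) : Prop := 1 ≤ n
instance (n : Int) : Decidable (Pre_solution n) := by unfold Pre_solution; infer_instance
def pvWitness_solution : Int := (5)

def Spec_solution (n : Int) (out : String) : Prop := out = solution_alt n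
instance (n : Int) (out : String) : Decidable (Spec_solution n out) := by unfold Spec_solution; infer_instance

-- ===== CLAIM (what is proved, stated in full; the proofs are below) =====
def Claim_equal_solution : Prop := ∀ (n : Int), Dom_solution n → Pre_solution n → Spec_solution n (solution n)

-- ===== LEMMAS AND PROOFS =====

-- common mathematical description: the bijective base-3 string of n with digit characters '1','2','4'
def pvDig : Nat → Char
  | 0 => '1'
  | 1 => '2'
  | _ => '4'

def pvRep : Nat → List Char
  | 0 => []
  | m+1 => pvRep (m / 3) ++ [pvDig (m % 3)]
decreasing_by exact Nat.lt_succ_of_le (Nat.div_le_self m 3)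

lemma pvRep_succ (m : Nat) : pvRep (m + 1) = pvRep (m / 3) ++ [pvDig (m % 3)] := by
  rw [pvRep]

-- A's subdivision, normalised: the j ternary digits (as the ints 1/2/4) of an offset m < 3^j
def pvDigits : Nat → Nat → List Int
  | 0, _ => []
  | j+1, m =>
    if m < 3 ^ j then 1 :: pvDigits j m
    else if m < 2 * 3 ^ j then 2 :: pvDigits j (m - 3 ^ j)
    else 4 :: pvDigits j (m - 2 * 3 ^ j)

def pvDmap : Nat → Int
  | 0 => 1
  | 1 => 2
  | _ => 4

lemma pv_join_cons (cs : List Char) (rest : List (List Char)) :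
    PySem.Chars.join [] (cs :: rest) = cs ++ PySem.Chars.join [] rest := by
  simp [PySem.Chars.join, List.intercalate]
  cases rest <;> simp [List.intersperse]

lemma pv_join_flatten (ls : List (List Char)) : PySem.Chars.join [] ls = ls.flatten := by
  induction ls with
  | nil => simp [PySem.Chars.join, List.intercalate]
  | cons c cs ih => rw [pv_join_cons, ih, List.flatten_cons]

lemma pv_join_toList (l : List Int) :
    (PySem.Str.join "" (l.map PySem.Int.toStr)).toList = l.flatMap PySem.Int.toChars := by
  simp only [PySem.Str.join, show "".toList = [] from rfl, pv_join_flatten]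
  simp [List.flatMap_def, List.map_map, Function.comp_def, PySem.Int.toList_toStr]

lemma pv_fdiv3 (x q : Int) (h1 : 3 * q ≤ x) (h2 : x < 3 * q + 3) :
    PySem.Int.floordiv x 3 = q := by
  rw [PySem.Int.floordiv_eq_ediv_of_pos (by norm_num)]; omega

-- peeling the LAST digit of the subdivision representation
lemma pvDigits_last : ∀ (j m : Nat), m < 3 ^ (j+1) →
    pvDigits (j+1) m = pvDigits j (m / 3) ++ [pvDmap (m % 3)] := by
  intro j
  induction j with
  | zero => intro m hm; interval_cases m <;> rfl
  | succ j ih =>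
    intro m hm
    have hI : (3:Nat) ^ (j+2) = 3 * 3 ^ (j+1) := by ring
    have hJ : (3:Nat) ^ (j+1) = 3 * 3 ^ j := by ring
    have hq : 0 < (3:Nat) ^ j := pow_pos (by norm_num : 0 < 3) j
    by_cases h1 : m < 3 ^ (j+1)
    · rw [show pvDigits (j+2) m = 1 :: pvDigits (j+1) m from by simp [pvDigits, h1],
          ih m h1]
      have hd : m / 3 < 3 ^ j := by omega
      simp [pvDigits, hd]
    · by_cases h2 : m < 2 * 3 ^ (j+1)
      · rw [show pvDigits (j+2) m = 2 :: pvDigits (j+1) (m - 3 ^ (j+1)) from by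
            simp [pvDigits, h1, h2], ih _ (by omega)]
        have e1 : (m - 3 ^ (j+1)) / 3 = m / 3 - 3 ^ j := by omega
        have e2 : (m - 3 ^ (j+1)) % 3 = m % 3 := by omega
        have hd1 : ¬ m / 3 < 3 ^ j := by omega
        have hd2 : m / 3 < 2 * 3 ^ j := by omega
        rw [e1, e2]
        simp [pvDigits, hd1, hd2]
      · rw [show pvDigits (j+2) m = 4 :: pvDigits (j+1) (m - 2 * 3 ^ (j+1)) from by
            simp [pvDigits, h1, h2], ih _ (by omega)]
        have e1 : (m - 2 * 3 ^ (j+1)) / 3 = m / 3 - 2 * 3 ^ j := by omega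
        have e2 : (m - 2 * 3 ^ (j+1)) % 3 = m % 3 := by omega
        have hd1 : ¬ m / 3 < 3 ^ j := by omega
        have hd2 : ¬ m / 3 < 2 * 3 ^ j := by omega
        rw [e1, e2]
        simp [pvDigits, hd1, hd2]

-- the subdivision digits of offset m spell the bijective base-3 string of m + (3^j - 1)/2
lemma pvDigits_rep : ∀ (j m : Nat), m < 3 ^ j →
    (pvDigits j m).flatMap PySem.Int.toChars = pvRep (m + (3 ^ j - 1) / 2) := by
  intro j
  induction j with
  | zero =>
    intro m hm
    have : m = 0 := by omega
    subst this; norm_num [pvDigits, pvRep]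
  | succ j ih =>
    intro m hm
    obtain ⟨t, ht⟩ : Odd (3 ^ j) := Odd.pow (by decide)
    have hJ : (3:Nat) ^ (j+1) = 3 * 3 ^ j := by ring
    rw [pvDigits_last j m hm]
    rw [List.flatMap_append]
    rw [ih (m / 3) (by omega)]
    rw [show m + (3 ^ (j+1) - 1) / 2 = (m + 3 * t) + 1 from by omega,
        pvRep_succ,
        show (m + 3 * t) / 3 = m / 3 + t from by omega,
        show (m + 3 * t) % 3 = m % 3 from by omega,
        show m / 3 + (3 ^ j - 1) / 2 = m / 3 + t from by omega]
    have hr : m % 3 = 0 ∨ m % 3 = 1 ∨ m % 3 = 2 := by omega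
    rcases hr with h | h | h <;> rw [h] <;> rfl

-- A's find appends exactly the subdivision digits of the offset n - a
lemma pvFindA_spec : ∀ (j fuel : Nat) (a b n : Int), j ≤ fuel → a ≤ n → n ≤ a + 3 ^ j - 1 →
    (b = a + 3 ^ j - 1 ∨ b = a + 3 ^ j) → pvFindA fuel a b n = pvDigits j (n - a).toNat := by
  intro j
  induction j with
  | zero =>
    intro fuel a b n _ ha hn hb
    simp only [pow_zero] at hn hb
    cases fuel with
    | zero => rfl
    | succ f =>
      rw [show pvFindA (f+1) a b n = [] from by
        simp only [pvFindA]; rw [if_pos (by omega)]]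
      rfl
  | succ j ih =>
    intro fuel a b n hf ha hn hb
    cases fuel with
    | zero => omega
    | succ f =>
      have hP : (0:Int) < 3 ^ j := pow_pos (by norm_num) j
      have h3 : (3:Int) ^ (j+1) = 3 * 3 ^ j := by ring
      have hcast : ((3 ^ j : Nat) : Int) = (3:Int) ^ j := by push_cast; rfl
      have ht1 : PySem.Int.floordiv (b - a + 1) 3 = 3 ^ j :=
        pv_fdiv3 _ _ (by omega) (by omega)
      have ht2 : PySem.Int.floordiv ((b - a + 1) * 2) 3 = 2 * 3 ^ j :=
        pv_fdiv3 _ _ (by omega) (by omega)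
      simp only [pvFindA, ht1, ht2]
      rw [if_neg (by omega)]
      by_cases hc1 : n < a + 3 ^ j
      · rw [if_pos ⟨ha, hc1⟩]
        rw [ih f a (a + 3 ^ j) n (by omega) ha (by omega) (Or.inr rfl)]
        have hlt : (n - a).toNat < 3 ^ j := by omega
        simp [pvDigits, hlt]
      · rw [if_neg (by omega)]
        by_cases hc2 : n < a + 2 * 3 ^ j
        · rw [if_pos ⟨by omega, hc2⟩]
          rw [ih f (a + 3 ^ j) (a + 2 * 3 ^ j) n (by omega) (by omega) (by omega)
                (Or.inr (by ring))]
          have hd1 : ¬ (n - a).toNat < 3 ^ j := by omega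
          have hd2 : (n - a).toNat < 2 * 3 ^ j := by omega
          have he : (n - (a + 3 ^ j)).toNat = (n - a).toNat - 3 ^ j := by omega
          rw [he]
          simp [pvDigits, hd1, hd2]
        · rw [if_neg (by omega), if_pos ⟨by omega, by omega⟩]
          rw [ih f (a + 2 * 3 ^ j) b n (by omega) (by omega) (by omega)
                (by rcases hb with hb | hb <;> [left; right] <;> omega)]
          have hd1 : ¬ (n - a).toNat < 3 ^ j := by omega
          have hd2 : ¬ (n - a).toNat < 2 * 3 ^ j := by omega
          have he : (n - (a + 2 * 3 ^ j)).toNat = (n - a).toNat - 2 * 3 ^ j := by omega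
          rw [he]
          simp [pvDigits, hd1, hd2]

-- A's outer loop returns interval bounds (s+1, s+3^k) with s < n ≤ s + 3^k and 2s = 3^k - 3
lemma pvLoopA_spec : ∀ (fuel : Nat) (start : Int) (i : Nat) (n : Int), 1 ≤ i →
    2 * start = 3 ^ i - 3 → start < n → n ≤ start + 3 * (fuel : Int) →
    ∃ (k : Nat) (s : Int), pvLoopA fuel start i n = (s + 1, s + 3 ^ k) ∧ 1 ≤ k ∧
      2 * s = 3 ^ k - 3 ∧ s < n ∧ n ≤ s + 3 ^ k := by
  intro fuel
  induction fuel with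
  | zero => intro start i n _ _ h1 h2; simp at h2; omega
  | succ f ihf =>
    intro start i n hi hinv h1 h2
    by_cases h : start < n ∧ n ≤ start + 3 ^ i
    · exact ⟨i, start, by simp only [pvLoopA]; rw [if_pos h], hi, hinv, h.1, h.2⟩
    · obtain ⟨j, rfl⟩ : ∃ j, i = j + 1 := ⟨i - 1, by omega⟩
      have hp : (1:Int) ≤ 3 ^ j := one_le_pow₀ (by norm_num)
      have h3 : (3:Int) ^ (j+1) = 3 * 3 ^ j := by ring
      have h4 : (3:Int) ^ (j+2) = 3 * 3 ^ (j+1) := by ring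
      have hgt : start + 3 ^ (j+1) < n := by omega
      obtain ⟨k, s, heq, hk, hkinv, hks, hkn⟩ :=
        ihf (start + 3 ^ (j+1)) (j+2) n (by omega) (by omega) hgt (by push_cast at h2 ⊢; omega)
      exact ⟨k, s, by simp only [pvLoopA]; rw [if_neg h]; exact heq, hk, hkinv, hks, hkn⟩

-- B's loop prepends the bijective base-3 digits of n
lemma pvLoopB_spec : ∀ (fuel : Nat) (n : Int) (s : String), 0 ≤ n → n ≤ (fuel : Int) →
    (pvLoopB fuel n s).toList = pvRep n.toNat ++ s.toList := by
  intro fuel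
  induction fuel with
  | zero =>
    intro n s h0 h1
    have hz : n.toNat = 0 := by omega
    simp [pvLoopB, hz, pvRep]
  | succ f ih =>
    intro n s h0 h1
    by_cases hz : n = 0
    · subst hz; simp [pvLoopB, pvRep]
    · have hpos : 1 ≤ n := by omega
      have hm0 := PySem.Int.mod_nonneg n (b := 3) (by norm_num)
      have hm1 := PySem.Int.mod_lt n (b := 3) (by norm_num)
      have hme : PySem.Int.mod n 3 = n % 3 := PySem.Int.mod_eq_emod_of_pos (a := n) (by norm_num)
      have hfd : PySem.Int.floordiv (n - 1) 3 = (n - 1) / 3 :=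
        PySem.Int.floordiv_eq_ediv_of_pos (by norm_num)
      have hrec : ∀ c : Char, (pvLoopB f (PySem.Int.floordiv (n - 1) 3) (String.ofList [c] ++ s)).toList
          = pvRep ((n.toNat - 1) / 3) ++ (c :: s.toList) := by
        intro c
        rw [hfd, ih _ _ (by omega) (by omega)]
        have : ((n - 1) / 3).toNat = (n.toNat - 1) / 3 := by omega
        rw [this]; simp
      have hsucc : pvRep n.toNat ++ s.toList
          = pvRep ((n.toNat - 1) / 3) ++ (pvDig ((n.toNat - 1) % 3) :: s.toList) := by
        rw [show n.toNat = (n.toNat - 1) + 1 from by omega, pvRep_succ]; simp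
      have hr : PySem.Int.mod n 3 = 0 ∨ PySem.Int.mod n 3 = 1 ∨ PySem.Int.mod n 3 = 2 := by omega
      rcases hr with h | h | h
      · simp only [pvLoopB, if_pos hz, h,
          show PySem.Str.pyGet? "412" (0:Int) = some '4' from by decide]
        rw [hrec '4', hsucc, show (n.toNat - 1) % 3 = 2 from by
          have h' : n % 3 = 0 := hme.symm.trans h; omega]
        rfl
      · simp only [pvLoopB, if_pos hz, h,
          show PySem.Str.pyGet? "412" (1:Int) = some '1' from by decide]
        rw [hrec '1', hsucc, show (n.toNat - 1) % 3 = 0 from by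
          have h' : n % 3 = 1 := hme.symm.trans h; omega]
        rfl
      · simp only [pvLoopB, if_pos hz, h,
          show PySem.Str.pyGet? "412" (2:Int) = some '2' from by decide]
        rw [hrec '2', hsucc, show (n.toNat - 1) % 3 = 1 from by
          have h' : n % 3 = 2 := hme.symm.trans h; omega]
        rfl

-- ===== VERDICT (by name: the statement is the Claim_ definition above) =====
theorem solution_spec : Claim_equal_solution := by
  intro n _ hpre
  unfold Pre_solution at hpre
  unfold Spec_solution
  apply String.toList_inj.mp
  obtain ⟨k, s, heq, hk, hinv, hsn, hns⟩ :=
    pvLoopA_spec (n.toNat + 1) 0 1 n (le_refl 1) (by norm_num) hpre (by push_cast; omega)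
  have hcast : ((3 ^ k : Nat) : Int) = (3:Int) ^ k := by push_cast; rfl
  have hkpow : k < 3 ^ k := Nat.lt_pow_self (by norm_num)
  simp only [solution, heq]
  rw [pvFindA_spec k ((s + 3 ^ k - (s + 1)).toNat + 1) (s + 1) (s + 3 ^ k) n
        (by omega) (by omega) (by omega) (Or.inl (by ring))]
  rw [pv_join_toList]
  rw [pvDigits_rep k (n - (s + 1)).toNat (by omega)]
  rw [show (n - (s + 1)).toNat + (3 ^ k - 1) / 2 = n.toNat from by omega]
  rw [show solution_alt n = pvLoopB (n.toNat + 1) n "" from rfl]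
  rw [pvLoopB_spec (n.toNat + 1) n "" (by omega) (by push_cast; omega)]
  simp
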